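-- pv_equiv track=rewrite | github.com/zrgt/aas4graph | aas_mapping/aas_neo4j_adapter/querification/ast_to_cypher.py | _convert_sme
-- ===== SOURCE A (Python) =====
-- from typing import Tuple
--
-- def _convert_sme(root: str, mapping: dict[str, int]) -> Tuple[str, str]:
--     """
--     Convert a SubmodelElement root string to a Cypher match part and last root identifier.
--
--     The `$sme` root indicates a path starting from a Submodel under which submodelElements
--     are traversed. Path segments may contain list indexing using square brackets, for example:
--         "$sme.myElement[0].subElement"
--
--     Returned tuple:
--         (match_part, last_root_identifier)
--
--     - match_part is the Cypher MATCH fragment representing the traversal from Submodel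
--       to nested SubmodelElements and any list-indexed edges.
--     - last_root_identifier is the identifier name of the deepest SubmodelElement node used
--       for attribute property lookups (e.g., "sme0", "sme1", ...). If no explicit idShort was
--       available, "sme" is used as the last root.
--
--     Raises:
--         ValueError: if `root` does not contain the `$sme` prefix.
--     """
--     if "$sme" not in root:
--         raise ValueError(f"Root does not contain $sme: {root}")
--     match_part: str = "(sm:Submodel)-[:submodelElements]->"
--     last_root: str = ""
--     if "sme" in mapping:
--         depth = mapping["sme"]
--     else:
--         mapping["sme"] = 0
--         depth = 0
--     for part in root.split(".")[1:]:
--         if "[" in part: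
--             for p in part.split("["):
--                 if "]" not in p:
--                     if depth == 0:
--                         match_part += f"(sme{depth}:SubmodelElement {{idShort: '{p}'}})"
--                     else:
--                         match_part += f"-[:value]->(sme{depth}:SubmodelElement {{idShort: '{p}'}})"
--                 elif len(p) > 1:
--                     # FIXME: take a look here: why we have a list_index for SubmodelELements?
--                     match_part += f"-[:value {{list_index: {p[:-1]}}}]->(sme{depth}:SubmodelElement)"
--                 else:
--                     match_part += f"-[:value]->(sme{depth}:SubmodelElement)"
--                 depth += 1
--         else:
--             if depth == 0:
--                 match_part += f"(sme{depth}:SubmodelElement {{idShort: '{part}'}})"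
--             else:
--                 match_part += f"-[:value]->(sme{depth}:SubmodelElement {{idShort: '{part}'}})"
--             last_root = f"sme{depth}"
--             depth += 1
--     if last_root != "":
--         mapping["sme"] = depth
--         return match_part, last_root
--     match_part += f"(sme{depth}: SubmodelElement)"
--     last_root = f"sme{depth}"
--     mapping["sme"] = depth + 1
--     return match_part, last_root
-- ===== SOURCE B (Python) =====
-- def _render(tok, d):
--     kind, s = tok
--     if kind == "idx":
--         return f"-[:value {{list_index: {s}}}]->(sme{d}:SubmodelElement)"
--     if kind == "bare":
--         return f"-[:value]->(sme{d}:SubmodelElement)"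
--     # "id" or "plain": a node with an idShort
--     pre = "" if d == 0 else "-[:value]->"
--     return pre + f"(sme{d}:SubmodelElement {{idShort: '{s}'}})"
--
--
-- def _convert_sme(root, mapping):
--     if "$sme" not in root:
--         raise ValueError(f"Root does not contain $sme: {root}")
--     d0 = mapping.get("sme")
--     if d0 is None:
--         mapping["sme"] = 0
--         d0 = 0
--     # Pass 1: flatten the path into a token list (depth-independent).
--     tokens = []
--     for seg in root.split(".")[1:]:
--         if "[" in seg:
--             for p in seg.split("["):
--                 if "]" not in p:
--                     tokens.append(("id", p))
--                 elif len(p) > 1: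
--                     tokens.append(("idx", p[:-1]))
--                 else:
--                     tokens.append(("bare", ""))
--         else:
--             tokens.append(("plain", seg))
--     # Pass 2: render each token at its closed-form depth d0 + i and join.
--     match_part = "(sm:Submodel)-[:submodelElements]->" + "".join(
--         _render(t, d0 + i) for i, t in enumerate(tokens))
--     plain_idxs = [i for i, t in enumerate(tokens) if t[0] == "plain"]
--     if plain_idxs:
--         mapping["sme"] = d0 + len(tokens)
--         return match_part, f"sme{d0 + plain_idxs[-1]}"
--     end = d0 + len(tokens)
--     match_part += f"(sme{end}: SubmodelElement)"
--     mapping["sme"] = end + 1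
--     return match_part, f"sme{end}"
-- ===== Notes on version B (the rewrite author's own statement) =====
-- stated objective: alternative
-- what changed: A interleaves rendering, depth counting and last_root tracking inside nested loops; B first flattens the path into a classified token list, then renders every token at its closed-form depth d0+i with a join, and derives last_root from the last plain-segment token index instead of loop-carried state.
import Mathlib
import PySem

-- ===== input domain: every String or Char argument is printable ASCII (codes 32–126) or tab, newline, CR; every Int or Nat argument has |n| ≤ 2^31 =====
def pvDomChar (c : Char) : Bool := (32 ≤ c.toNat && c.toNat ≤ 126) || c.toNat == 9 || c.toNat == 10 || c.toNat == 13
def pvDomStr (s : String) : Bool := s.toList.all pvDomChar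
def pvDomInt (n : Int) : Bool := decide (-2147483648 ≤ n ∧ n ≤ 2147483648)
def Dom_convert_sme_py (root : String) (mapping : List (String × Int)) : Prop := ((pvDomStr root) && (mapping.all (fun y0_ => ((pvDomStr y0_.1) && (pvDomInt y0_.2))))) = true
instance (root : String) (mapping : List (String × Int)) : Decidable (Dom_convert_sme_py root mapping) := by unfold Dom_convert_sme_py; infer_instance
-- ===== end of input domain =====

-- B re-decomposes A's interleaved nested loops into tokenize-then-render passes (same cost, clearer);
-- equivalence is about the RETURN value only: A's in-place mutation of `mapping` (the Python B performs
-- the identical mutation) is not modelled by these ports.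

-- ===== PORT A =====
-- A's inner `for p in part.split("[")` loop body, state (match_part, depth).
def pvAInner (st : String × Int) (p : String) : String × Int :=
  if PySem.Str.isIn "]" p = false then
    if st.2 = 0 then
      (st.1 ++ "(sme" ++ PySem.Int.toStr st.2 ++ ":SubmodelElement {idShort: '" ++ p ++ "'})", st.2 + 1)
    else
      (st.1 ++ "-[:value]->(sme" ++ PySem.Int.toStr st.2 ++ ":SubmodelElement {idShort: '" ++ p ++ "'})", st.2 + 1)
  else if 1 < PySem.Str.len p then
    (st.1 ++ "-[:value {list_index: " ++ PySem.Str.slice p none (some (-1)) ++ "}]->(sme" ++ PySem.Int.toStr st.2 ++ ":SubmodelElement)", st.2 + 1)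
  else
    (st.1 ++ "-[:value]->(sme" ++ PySem.Int.toStr st.2 ++ ":SubmodelElement)", st.2 + 1)

-- A's outer `for part in root.split(".")[1:]` loop body, state (match_part, last_root, depth).
def pvAStep (st : String × String × Int) (part : String) : String × String × Int :=
  if PySem.Str.isIn "[" part then
    let r := ((PySem.Str.split? part "[").getD []).foldl pvAInner (st.1, st.2.2)
    (r.1, st.2.1, r.2)
  else
    if st.2.2 = 0 then
      (st.1 ++ "(sme" ++ PySem.Int.toStr st.2.2 ++ ":SubmodelElement {idShort: '" ++ part ++ "'})",
       "sme" ++ PySem.Int.toStr st.2.2, st.2.2 + 1)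
    else
      (st.1 ++ "-[:value]->(sme" ++ PySem.Int.toStr st.2.2 ++ ":SubmodelElement {idShort: '" ++ part ++ "'})",
       "sme" ++ PySem.Int.toStr st.2.2, st.2.2 + 1)

-- The `raise ValueError` when "$sme" is not in `root` is excluded by Pre_convert_sme_py.
-- `.split(".")` never raises (sep ≠ ""), so `(… ).getD []` is exact.
def convert_sme_py (root : String) (mapping : List (String × Int)) : String × String :=
  let depth0 : Int :=
    match PySem.Dict.get? (PySem.Dict.mk mapping) "sme" with
    | some d => d
    | none => 0
  let fin := (((PySem.Str.split? root ".").getD []).drop 1).foldl pvAStep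
    ("(sm:Submodel)-[:submodelElements]->", "", depth0)
  if fin.2.1 ≠ "" then (fin.1, fin.2.1)
  else (fin.1 ++ "(sme" ++ PySem.Int.toStr fin.2.2 ++ ": SubmodelElement)",
        "sme" ++ PySem.Int.toStr fin.2.2)

-- ===== PORT B =====
inductive SmeTok
  | id : String → SmeTok
  | idx : String → SmeTok
  | bare : SmeTok
  | plain : String → SmeTok
deriving DecidableEq, Repr

-- classification of one piece of a bracketed segment (Source B's inner if/elif/else)
def pvTokOf (p : String) : SmeTok :=
  if PySem.Str.isIn "]" p = false then SmeTok.id p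
  else if 1 < PySem.Str.len p then SmeTok.idx (PySem.Str.slice p none (some (-1)))
  else SmeTok.bare

-- tokens of one path segment
def pvTokSeg (seg : String) : List SmeTok :=
  if PySem.Str.isIn "[" seg then ((PySem.Str.split? seg "[").getD []).map pvTokOf
  else [SmeTok.plain seg]

-- Source B's `_render`: the Cypher fragment of one token at depth d
def pvRender (t : SmeTok) (d : Int) : String :=
  match t with
  | SmeTok.idx s => "-[:value {list_index: " ++ s ++ "}]->(sme" ++ PySem.Int.toStr d ++ ":SubmodelElement)"
  | SmeTok.bare => "-[:value]->(sme" ++ PySem.Int.toStr d ++ ":SubmodelElement)"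
  | SmeTok.id s =>
      (if d = 0 then "" else "-[:value]->") ++ "(sme" ++ PySem.Int.toStr d ++ ":SubmodelElement {idShort: '" ++ s ++ "'})"
  | SmeTok.plain s =>
      (if d = 0 then "" else "-[:value]->") ++ "(sme" ++ PySem.Int.toStr d ++ ":SubmodelElement {idShort: '" ++ s ++ "'})"

def pvIsPlain : SmeTok → Bool
  | SmeTok.plain _ => true
  | _ => false

def convert_sme_py_alt (root : String) (mapping : List (String × Int)) : String × String :=
  let d0 : Int := (PySem.Dict.get? (PySem.Dict.mk mapping) "sme").getD 0
  let toks := (((PySem.Str.split? root ".").getD []).drop 1).flatMap pvTokSeg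
  let matchPart := "(sm:Submodel)-[:submodelElements]->" ++
    PySem.Str.join "" (toks.zipIdx.map (fun ti => pvRender ti.1 (d0 + (ti.2 : Int))))
  let plainIdxs : List Nat := ((toks.zipIdx.filter (fun ti => pvIsPlain ti.1)).map (·.2))
  match plainIdxs.getLast? with
  | some i =>
      (matchPart, "sme" ++ PySem.Int.toStr (d0 + (i : Int)))
  | none =>
      let endD := d0 + (toks.length : Int)
      (matchPart ++ "(sme" ++ PySem.Int.toStr endD ++ ": SubmodelElement)",
       "sme" ++ PySem.Int.toStr endD)

-- ===== PRECONDITION & SPEC =====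
-- Pre_ excludes exactly the inputs where A raises ValueError ("$sme" not a substring of root).
def Pre_convert_sme_py (root : String) (mapping : List (String × Int)) : Prop :=
  PySem.Str.isIn "$sme" root = true
instance (root : String) (mapping : List (String × Int)) : Decidable (Pre_convert_sme_py root mapping) := by unfold Pre_convert_sme_py; infer_instance
def pvWitness_convert_sme_py : String × (List (String × Int)) := ("$sme.elem[0].sub", [("sme", 1)])

def Spec_convert_sme_py (root : String) (mapping : List (String × Int)) (out : String × String) : Prop := out = convert_sme_py_alt root mapping
instance (root : String) (mapping : List (String × Int)) (out : String × String) : Decidable (Spec_convert_sme_py root mapping out) := by unfold Spec_convert_sme_py; infer_instance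

-- ===== CLAIM (what is proved, stated in full; the proofs are below) =====
def Claim_equal_convert_sme_py : Prop := ∀ (root : String) (mapping : List (String × Int)), Dom_convert_sme_py root mapping → Pre_convert_sme_py root mapping → Spec_convert_sme_py root mapping (convert_sme_py root mapping)

-- ===== LEMMAS AND PROOFS =====

-- the per-token step that A's two loop bodies both implement
def pvTStep (st : String × String × Int) (t : SmeTok) : String × String × Int :=
  (st.1 ++ pvRender t st.2.2,
   (if pvIsPlain t then "sme" ++ PySem.Int.toStr st.2.2 else st.2.1),
   st.2.2 + 1)

theorem pv_flatten_intersperse_nil (l : List (List Char)) :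
    (List.intersperse ([] : List Char) l).flatten = l.flatten := by
  induction l with
  | nil => rfl
  | cons a t ih =>
    cases t with
    | nil => rfl
    | cons b t' => simp_all [List.intersperse]

theorem pv_join_nil : PySem.Str.join "" [] = "" := by decide

theorem pv_join_cons (x : String) (xs : List String) :
    PySem.Str.join "" (x :: xs) = x ++ PySem.Str.join "" xs := by
  simp [PySem.Str.join, PySem.Chars.join, List.intercalate, pv_flatten_intersperse_nil]

-- A's inner loop = pvTStep over the classified pieces (last_root untouched)
theorem pv_inner_eq (ps : List String) : ∀ (m lr : String) (d : Int),
    (((ps.foldl pvAInner (m, d)).1, lr, (ps.foldl pvAInner (m, d)).2) : String × String × Int)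
      = (ps.map pvTokOf).foldl pvTStep (m, lr, d) := by
  induction ps with
  | nil => intro m lr d; rfl
  | cons p t ih =>
    intro m lr d
    have hstep : pvTStep (m, lr, d) (pvTokOf p)
        = ((pvAInner (m, d) p).1, lr, (pvAInner (m, d) p).2) := by
      unfold pvAInner pvTokOf
      split_ifs <;>
        simp_all [pvTStep, pvRender, pvIsPlain, String.append_assoc, String.empty_append]
    simp only [List.foldl_cons, List.map_cons, hstep]
    exact ih _ lr _

-- A's outer loop body on one segment = pvTStep over that segment's tokens
theorem pv_step_eq (part : String) (st : String × String × Int) :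
    pvAStep st part = (pvTokSeg part).foldl pvTStep st := by
  obtain ⟨m, lr, d⟩ := st
  by_cases h1 : PySem.Str.isIn "[" part
  · simp only [pvAStep, pvTokSeg, if_pos h1]
    exact pv_inner_eq _ m lr d
  · by_cases h0 : d = 0 <;>
      simp_all [pvAStep, pvTokSeg, pvTStep, pvRender, pvIsPlain,
        String.append_assoc, String.empty_append]

-- full characterisation of the pvTStep fold: rendered fragments, last plain index, final depth
theorem pv_fold_eq (toks : List SmeTok) : ∀ (k : Nat) (m lr : String) (d0 : Int),
    toks.foldl pvTStep (m, lr, d0 + (k : Int)) =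
      (m ++ PySem.Str.join "" ((toks.zipIdx k).map (fun ti => pvRender ti.1 (d0 + (ti.2 : Int)))),
       (match (((toks.zipIdx k).filter (fun ti => pvIsPlain ti.1)).map (·.2)).getLast? with
        | some i => "sme" ++ PySem.Int.toStr (d0 + (i : Int))
        | none => lr),
       d0 + (k : Int) + (toks.length : Int)) := by
  induction toks with
  | nil =>
    intro k m lr d0
    simp [pv_join_nil]
  | cons t ts ih =>
    intro k m lr d0
    have hd : d0 + (k : Int) + 1 = d0 + ((k + 1 : Nat) : Int) := by push_cast; ring
    simp only [List.foldl_cons, pvTStep, hd]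
    rw [ih (k + 1) _ _ d0]
    simp only [List.zipIdx_cons, List.map_cons, pv_join_cons, List.filter_cons]
    by_cases hp : pvIsPlain t
    · simp only [hp]
      cases hlast : ((((ts.zipIdx (k+1)).filter (fun ti => pvIsPlain ti.1)).map (·.2)).getLast?) with
      | none => simp [hlast, List.getLast?_cons, String.append_assoc]; ring
      | some i => simp [hlast, List.getLast?_cons, String.append_assoc]; ring
    · simp only [Bool.not_eq_true] at hp
      simp [hp, String.append_assoc]
      ring

-- ===== VERDICT (by name: the statement is the Claim_ definition above) =====
theorem convert_sme_py_spec : Claim_equal_convert_sme_py := by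
  intro root mapping _ _
  have hdep : (match PySem.Dict.get? (PySem.Dict.mk mapping) "sme" with
      | some d => d
      | none => 0) = (PySem.Dict.get? (PySem.Dict.mk mapping) "sme").getD 0 := by
    cases PySem.Dict.get? (PySem.Dict.mk mapping) "sme" <;> rfl
  unfold Spec_convert_sme_py
  simp only [convert_sme_py, convert_sme_py_alt, hdep]
  set d0 := (PySem.Dict.get? (PySem.Dict.mk mapping) "sme").getD 0 with hd0
  set segs := (((PySem.Str.split? root ".").getD []).drop 1) with hsegs
  set toks := segs.flatMap pvTokSeg with htoks
  have hfold : segs.foldl pvAStep ("(sm:Submodel)-[:submodelElements]->", "", d0)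
      = toks.foldl pvTStep ("(sm:Submodel)-[:submodelElements]->", "", d0) := by
    rw [htoks, List.flatMap, List.foldl_flatten, List.foldl_map]
    exact PySem.List.foldl_congr_mem _ _ _ _ (fun st part _ => pv_step_eq part st)
  have hmain := pv_fold_eq toks 0 "(sm:Submodel)-[:submodelElements]->" "" d0
  simp only [Nat.cast_zero, add_zero] at hmain
  rw [hfold, hmain]
  cases hlast : ((((toks.zipIdx).filter (fun ti => pvIsPlain ti.1)).map (·.2)).getLast?) with
  | none => simp [String.append_assoc]
  | some i => simp [ne_eq]
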